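-- pv_equiv track=rewrite | github.com/takakix2/fooddb-jp | scripts/legacy/generate_header_full.py | generate_column_letters
-- ===== SOURCE A (Python) =====
-- def generate_column_letters(n):
--     result = []
--     for i in range(n):
--         col = ""
--         index = i
--         while index >= 0:
--             col = chr(index % 26 + 65) + col
--             index = index // 26 - 1
--         result.append(col)
--     return result
-- ===== SOURCE B (Python) =====
-- def _inc(rev):
--     # increment a label stored least-significant-letter first
--     if not rev:
--         return ['A']
--     if rev[0] == 'Z':
--         return ['A'] + _inc(rev[1:])
--     return [chr(ord(rev[0]) + 1)] + rev[1:]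
--
-- def generate_column_letters(n):
--     result = []
--     rev = []  # running label, least-significant letter first
--     for _ in range(n):
--         rev = _inc(rev)
--         result.append(''.join(reversed(rev)))
--     return result
-- ===== Notes on version B (the rewrite author's own statement) =====
-- stated objective: alternative
-- what changed: Instead of recomputing each label from its index i by repeated divmod-26, B keeps one running label (least-significant letter first) and increments it with a recursive carry per step, appending the reversed label each time.
import Mathlib
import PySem

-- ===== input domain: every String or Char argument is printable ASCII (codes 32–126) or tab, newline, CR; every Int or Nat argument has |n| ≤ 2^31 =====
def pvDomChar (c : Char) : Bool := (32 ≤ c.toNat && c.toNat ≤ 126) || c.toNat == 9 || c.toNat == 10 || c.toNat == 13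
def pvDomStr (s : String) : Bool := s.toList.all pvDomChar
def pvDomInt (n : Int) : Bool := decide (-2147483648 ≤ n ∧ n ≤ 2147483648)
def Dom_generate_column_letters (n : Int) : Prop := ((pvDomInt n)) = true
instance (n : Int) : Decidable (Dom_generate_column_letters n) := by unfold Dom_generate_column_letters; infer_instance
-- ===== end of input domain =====

-- B replaces per-index divmod-26 label computation by one running label incremented
-- with a recursive carry each step (alternative decomposition, same result).


-- ===== PORT A =====
-- inner while loop of A: col is a List Char (built by cons = Python string prepend; exact on chars)
def pyColLoop (index : Int) (col : List Char) : List Char :=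
  if _h : 0 ≤ index then
    pyColLoop (PySem.Int.floordiv index 26 - 1)
      (Char.ofNat (PySem.Int.mod index 26 + 65).toNat :: col)
  else col
termination_by (index + 1).toNat
decreasing_by
  have h26 : PySem.Int.floordiv index 26 = index / 26 :=
    PySem.Int.floordiv_eq_ediv_of_pos (by omega)
  have : index / 26 ≤ index := Int.ediv_le_self _ _h
  have : 0 ≤ index / 26 := Int.ediv_nonneg _h (by omega)
  omega

def generate_column_letters (n : Int) : List String :=
  (PySem.List.pyRange 0 n 1).foldl
    (fun result i => result ++ [String.mk (pyColLoop i [])]) []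

-- ===== PORT B =====
-- _inc from Source B: increment a label stored least-significant letter first
def incRev : List Char → List Char
  | [] => ['A']
  | c :: rest => if c = 'Z' then 'A' :: incRev rest else Char.ofNat (c.toNat + 1) :: rest

def generate_column_letters_alt (n : Int) : List String :=
  ((PySem.List.pyRange 0 n 1).foldl
    (fun (st : List Char × List String) _ =>
      let r := incRev st.1
      (r, st.2 ++ [String.mk r.reverse])) ([], [])).2

-- ===== PRECONDITION & SPEC =====
def Spec_generate_column_letters (n : Int) (out : List String) : Prop := out = generate_column_letters_alt n
instance (n : Int) (out : List String) : Decidable (Spec_generate_column_letters n out) := by unfold Spec_generate_column_letters; infer_instance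

-- ===== CLAIM (what is proved, stated in full; the proofs are below) =====
def Claim_equal_generate_column_letters : Prop := ∀ (n : Int), Dom_generate_column_letters n → Spec_generate_column_letters n (generate_column_letters n)

-- ===== LEMMAS AND PROOFS =====

-- digits of the bijective base-26 label of column i, least-significant first
def digitsRev (i : Nat) : List Char :=
  Char.ofNat (i % 26 + 65) :: (if _h : i < 26 then [] else digitsRev (i / 26 - 1))
decreasing_by
  have : i / 26 < i := Nat.div_lt_self (by omega) (by omega)
  omega

theorem toNat_ofNat_small (m : Nat) (h : m < 1000) : (Char.ofNat m).toNat = m := by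
  rw [Char.toNat_ofNat]; simp [Nat.isValidChar]; omega

theorem ofNat_eq_Z (m : Nat) (_h : m < 26) : (Char.ofNat (m + 65) = 'Z') ↔ m = 25 := by
  constructor
  · intro he
    have h2 := toNat_ofNat_small (m + 65) (by omega)
    rw [he] at h2; simp at h2; omega
  · rintro rfl; decide

-- the A-side while loop computes exactly the reversed digitsRev
theorem colLoop_eq (i : Nat) : ∀ col, pyColLoop (i : Int) col = (digitsRev i).reverse ++ col := by
  induction i using Nat.strong_induction_on with
  | _ i ih =>
    intro col
    rw [pyColLoop]
    have hfd : PySem.Int.floordiv (i : Int) 26 = ((i / 26 : Nat) : Int) := by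
      exact_mod_cast PySem.Int.floordiv_natCast i 26
    have hmd : PySem.Int.mod (i : Int) 26 = ((i % 26 : Nat) : Int) := by
      exact_mod_cast PySem.Int.mod_natCast i 26
    simp only [Int.natCast_nonneg, dite_true, hfd, hmd]
    have hdig : ((((i % 26 : Nat) : Int)) + 65).toNat = i % 26 + 65 := by omega
    rw [hdig]
    by_cases hlt : i < 26
    · have h0 : i / 26 = 0 := Nat.div_eq_of_lt hlt
      rw [h0]
      norm_num
      rw [pyColLoop]
      norm_num
      rw [digitsRev]
      simp [hlt]
    · have h1 : 1 ≤ i / 26 := (Nat.le_div_iff_mul_le (by omega)).2 (by omega)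
      have hcast : ((i / 26 : Nat) : Int) - 1 = ((i / 26 - 1 : Nat) : Int) := by omega
      have hsm : i / 26 - 1 < i := by
        have := Nat.div_lt_self (show 0 < i by omega) (show 1 < 26 by omega)
        omega
      rw [hcast, ih (i / 26 - 1) hsm]
      conv_rhs => rw [digitsRev]
      simp [hlt]

-- the carry increment moves digitsRev one step forward
theorem inc_digits (i : Nat) : incRev (digitsRev i) = digitsRev (i + 1) := by
  induction i using Nat.strong_induction_on with
  | _ i ih =>
    rw [digitsRev, incRev]
    by_cases h25 : i % 26 = 25
    · rw [if_pos ((ofNat_eq_Z _ (Nat.mod_lt _ (by omega))).2 h25)]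
      have hmod : (i + 1) % 26 = 0 := by omega
      have hdiv : (i + 1) / 26 = i / 26 + 1 := by omega
      by_cases hlt : i < 26
      · have : i = 25 := by omega
        subst this
        norm_num
        rw [digitsRev, digitsRev]
        simp [incRev]
      · have hsm : i / 26 - 1 < i := by
          have := Nat.div_lt_self (show 0 < i by omega) (show 1 < 26 by omega)
          omega
        rw [dif_neg hlt, ih (i / 26 - 1) hsm]
        conv_rhs => rw [digitsRev]
        have h1 : 1 ≤ i / 26 := (Nat.le_div_iff_mul_le (by omega)).2 (by omega)
        have hlt2 : ¬ (i + 1 < 26) := by omega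
        rw [dif_neg hlt2]
        have : i / 26 - 1 + 1 = (i + 1) / 26 - 1 := by omega
        rw [this, hmod]
    · rw [if_neg (by rw [ofNat_eq_Z _ (Nat.mod_lt _ (by omega))]; exact h25)]
      rw [toNat_ofNat_small _ (by have := Nat.mod_lt i (show 0 < 26 by omega); omega)]
      conv_rhs => rw [digitsRev]
      have hmod : (i + 1) % 26 = i % 26 + 1 := by omega
      have hdiv : (i + 1) / 26 = i / 26 := by omega
      rw [hmod, hdiv]
      by_cases hlt : i < 26
      · have : i + 1 < 26 := by
          have : i % 26 = i := Nat.mod_eq_of_lt hlt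
          omega
        simp [hlt, this]
      · have : ¬ (i + 1 < 26) := by omega
        simp [hlt, this]

-- running label after m steps (empty before the first increment)
def labelAt : Nat → List Char
  | 0 => []
  | m + 1 => digitsRev m

theorem inc_labelAt (m : Nat) : incRev (labelAt m) = labelAt (m + 1) := by
  cases m with
  | zero =>
    show incRev [] = digitsRev 0
    rw [digitsRev, incRev]
    norm_num
  | succ k => exact inc_digits k

def gLabel (k : Nat) : String := String.mk (digitsRev k).reverse

-- B's fold characterised
theorem foldB (m : Nat) :
    (List.range m).foldl
      (fun (st : List Char × List String) (_ : Nat) =>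
        let r := incRev st.1
        (r, st.2 ++ [String.mk r.reverse])) ([], [])
    = (labelAt m, (List.range m).map gLabel) := by
  induction m with
  | zero => rfl
  | succ k ih =>
    rw [List.range_succ, List.foldl_append, ih, List.map_append]
    simp only [List.foldl_cons, List.foldl_nil, inc_labelAt]
    simp [labelAt, gLabel]

-- foldl with append-singleton is map
theorem foldl_append_map {α β : Type} (f : α → β) :
    ∀ (l : List α) (acc : List β), l.foldl (fun acc x => acc ++ [f x]) acc = acc ++ l.map f := by
  intro l
  induction l with
  | nil => simp
  | cons x xs ih => intro acc; simp [ih]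

-- ===== VERDICT (by name: the statement is the Claim_ definition above) =====
theorem generate_column_letters_spec : Claim_equal_generate_column_letters := by
  intro n _
  unfold Spec_generate_column_letters generate_column_letters generate_column_letters_alt
  rw [PySem.List.pyRange_one]
  simp only [List.foldl_map, Int.sub_zero]
  rw [foldl_append_map]
  have hB :
      (List.range n.toNat).foldl
        (fun (st : List Char × List String) (_ : Nat) =>
          let r := incRev st.1
          (r, st.2 ++ [String.mk r.reverse])) ([], [])
      = (labelAt n.toNat, (List.range n.toNat).map gLabel) := foldB n.toNat
  rw [hB]
  simp only [List.nil_append]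
  apply List.map_congr_left
  intro k _
  rw [show ((0 : Int) + (k : Int)) = (k : Int) by omega, colLoop_eq k []]
  simp [gLabel]
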